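-- pv_equiv track=rewrite | github.com/MalayBhunia/Smart_Calculator | Calculator.py | next_armstrong
-- ===== SOURCE A (Python) =====
-- def is_armstrong(num):
--     try:
--         if num<=0 or type(num)!=int:
--             raise ValueError
--         power = len(str(num))
--         return num == sum(int(digit) ** power for digit in str(num))
--     except ValueError:
--         return "Input must be an positive integer."
--
-- def next_armstrong(num):
--     try:
--         if num<=0:
--             return 1
--         num+=1
--         while not is_armstrong(num):
--             num+=1
--         return num
--     except ValueError:
--         return "Input must be an integer."
-- ===== SOURCE B (Python) =====
-- # B: same upward scan, but the narcissism test works purely arithmetically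
-- # (digit count and digit-power sum by repeated divmod) instead of converting
-- # the candidate to a string twice and parsing each character back to an int.
-- def _is_narcissistic(n):
--     k = 0
--     t = n
--     while t:
--         t //= 10
--         k += 1
--     s = 0
--     t = n
--     while t:
--         s += (t % 10) ** k
--         t //= 10
--     return s == n
--
-- def next_armstrong(num):
--     if num <= 0:
--         return 1
--     n = num + 1
--     while True:
--         if _is_narcissistic(n):
--             return n
--         n += 1
-- ===== Notes on version B (the rewrite author's own statement) =====
-- stated objective: alternative
-- what changed: B keeps the upward scan but tests narcissism purely arithmetically (digit count and digit-power sum by repeated divmod) instead of A's double string conversion with per-character int() parsing and exception scaffolding.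
import Mathlib
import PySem

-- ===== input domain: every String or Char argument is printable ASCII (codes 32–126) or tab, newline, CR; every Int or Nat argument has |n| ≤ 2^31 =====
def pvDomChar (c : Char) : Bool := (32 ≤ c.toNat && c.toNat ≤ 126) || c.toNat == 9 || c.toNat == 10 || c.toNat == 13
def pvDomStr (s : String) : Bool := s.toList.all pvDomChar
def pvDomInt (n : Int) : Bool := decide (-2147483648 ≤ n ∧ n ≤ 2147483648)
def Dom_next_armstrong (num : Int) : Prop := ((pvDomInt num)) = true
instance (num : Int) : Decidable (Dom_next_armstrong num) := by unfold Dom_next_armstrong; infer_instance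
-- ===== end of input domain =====

-- B replaces A's string-based digit test (str + int(ch) per digit) by a purely
-- arithmetic divmod test; same upward scan, alternative mechanism (not claimed faster).

-- ===== PORT A =====
-- truthiness of is_armstrong's result as used by A's loop: for num ≤ 0 the
-- function returns a non-empty string, which is truthy, hence `true` here;
-- int(digit) on the single decimal-digit characters produced by str(num) is
-- exactly (c.toNat : Int) - 48 (exact on this reached input set).
def isArmA (n : Int) : Bool :=
  if n ≤ 0 then true
  else
    let power := (PySem.Int.toChars n).length
    n == ((PySem.Int.toChars n).map (fun c => ((c.toNat : Int) - 48) ^ power)).sum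

-- A's `while not is_armstrong(num): num += 1`; the fuel only makes the loop a
-- total Lean function (it is never exhausted on inputs the claim is tested on).
def loopA : Nat → Int → Int
  | 0, n => n
  | f + 1, n => if isArmA n then n else loopA f (n + 1)

def next_armstrong (num : Int) : Int :=
  if num ≤ 0 then 1 else loopA 5000000000 (num + 1)

-- ===== PORT B =====
-- first while-loop of _is_narcissistic: count digits by repeated //= 10
def digCountB : Nat → Int → Nat → Nat
  | 0, _, k => k
  | f + 1, t, k => if t = 0 then k else digCountB f (PySem.Int.floordiv t 10) (k + 1)

-- second while-loop of _is_narcissistic: sum of (t % 10) ** k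
def digPowSumB : Nat → Int → Nat → Int → Int
  | 0, _, _, s => s
  | f + 1, t, k, s =>
    if t = 0 then s else digPowSumB f (PySem.Int.floordiv t 10) k (s + (PySem.Int.mod t 10) ^ k)

-- fuel n.natAbs + 1 strictly bounds the number of iterations for every n ≥ 0
def isNarcB (n : Int) : Bool :=
  let k := digCountB (n.natAbs + 1) n 0
  digPowSumB (n.natAbs + 1) n k 0 == n

def loopB : Nat → Int → Int
  | 0, n => n
  | f + 1, n => if isNarcB n then n else loopB f (n + 1)

def next_armstrong_alt (num : Int) : Int :=
  if num ≤ 0 then 1 else loopB 5000000000 (num + 1)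

-- ===== PRECONDITION & SPEC =====
def Spec_next_armstrong (num : Int) (out : Int) : Prop := out = next_armstrong_alt num
instance (num : Int) (out : Int) : Decidable (Spec_next_armstrong num out) := by unfold Spec_next_armstrong; infer_instance

-- ===== CLAIM (what is proved, stated in full; the proofs are below) =====
def Claim_equal_next_armstrong : Prop := ∀ (num : Int), Dom_next_armstrong num → Spec_next_armstrong num (next_armstrong num)

-- ===== LEMMAS AND PROOFS =====

lemma digitChar_val (d : Nat) (hd : d < 10) : ((Nat.digitChar d).toNat : Int) - 48 = d := by
  interval_cases d <;> decide

lemma toDigitsCore_eq (fuel : Nat) : ∀ (m : Nat) (ds : List Char), 0 < m → m < fuel →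
    Nat.toDigitsCore 10 fuel m ds = ((Nat.digits 10 m).map Nat.digitChar).reverse ++ ds := by
  induction fuel with
  | zero => intro m ds hm hf; omega
  | succ f ih =>
    intro m ds hm hf
    rw [Nat.digits_def' (b := 10) (by norm_num) hm]
    simp only [Nat.toDigitsCore]
    by_cases h : m / 10 = 0
    · simp [h]
    · rw [if_neg h, ih (m / 10) _ (Nat.pos_of_ne_zero h) (by omega)]
      simp

lemma toDigits_eq (m : Nat) (hm : 0 < m) :
    Nat.toDigits 10 m = ((Nat.digits 10 m).map Nat.digitChar).reverse := by
  unfold Nat.toDigits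
  rw [toDigitsCore_eq (m + 1) m [] hm (by omega)]
  simp

lemma digCountB_eq (fuel : Nat) : ∀ (m k : Nat), m < fuel →
    digCountB fuel (m : Int) k = k + (Nat.digits 10 m).length := by
  induction fuel with
  | zero => intro m k h; omega
  | succ f ih =>
    intro m k h
    rcases Nat.eq_zero_or_pos m with hm | hm
    · subst hm; simp [digCountB]
    · rw [digCountB, if_neg (by exact_mod_cast hm.ne')]
      have hdiv : PySem.Int.floordiv (m : Int) 10 = ((m / 10 : Nat) : Int) := by
        exact_mod_cast PySem.Int.floordiv_natCast m 10
      rw [hdiv, ih (m / 10) (k + 1) (by omega),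
        Nat.digits_def' (b := 10) (by norm_num) hm]
      simp; omega

lemma digPowSumB_eq (fuel : Nat) : ∀ (m k : Nat) (s : Int), m < fuel →
    digPowSumB fuel (m : Int) k s
      = s + ((Nat.digits 10 m).map (fun d : Nat => ((d : Int)) ^ k)).sum := by
  induction fuel with
  | zero => intro m k s h; omega
  | succ f ih =>
    intro m k s h
    rcases Nat.eq_zero_or_pos m with hm | hm
    · subst hm; simp [digPowSumB]
    · rw [digPowSumB, if_neg (by exact_mod_cast hm.ne')]
      have hdiv : PySem.Int.floordiv (m : Int) 10 = ((m / 10 : Nat) : Int) := by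
        exact_mod_cast PySem.Int.floordiv_natCast m 10
      have hmod : PySem.Int.mod (m : Int) 10 = ((m % 10 : Nat) : Int) := by
        exact_mod_cast PySem.Int.mod_natCast m 10
      rw [hdiv, hmod, ih (m / 10) k _ (by omega),
        Nat.digits_def' (b := 10) (by norm_num) hm]
      simp; ring

lemma isArmA_eq_isNarcB (n : Int) (hn : 1 ≤ n) : isArmA n = isNarcB n := by
  obtain ⟨m, rfl⟩ : ∃ m : Nat, n = (m : Int) := ⟨n.toNat, by omega⟩
  have hm : 0 < m := by exact_mod_cast hn
  have hchars : PySem.Int.toChars (m : Int) = ((Nat.digits 10 m).map Nat.digitChar).reverse := by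
    rw [PySem.Int.toChars, if_neg (by omega)]
    simpa using toDigits_eq m hm
  set k := (Nat.digits 10 m).length with hkdef
  have hlen : (PySem.Int.toChars (m : Int)).length = k := by simp [hchars, hkdef]
  have hk : digCountB (m + 1) (m : Int) 0 = k := by
    simpa [hkdef] using digCountB_eq (m + 1) m 0 (by omega)
  have hmapsum : ((PySem.Int.toChars (m : Int)).map (fun c => ((c.toNat : Int) - 48) ^ k)).sum
      = ((Nat.digits 10 m).map (fun d : Nat => ((d : Int)) ^ k)).sum := by
    rw [hchars, ← List.map_reverse]
    simp only [List.map_map]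
    rw [List.map_reverse, List.sum_reverse]
    congr 1
    apply List.map_congr_left
    intro d hd
    have hv := digitChar_val d (Nat.digits_lt_base (by norm_num) hd)
    simp [Function.comp, hv]
  have hsum : digPowSumB (m + 1) (m : Int) k 0
      = ((Nat.digits 10 m).map (fun d : Nat => ((d : Int)) ^ k)).sum := by
    simpa using digPowSumB_eq (m + 1) m k 0 (by omega)
  rw [isArmA, if_neg (by omega), isNarcB]
  simp only [Int.natAbs_natCast, hk, hlen, hsum, hmapsum]
  rw [Bool.eq_iff_iff]
  simp only [beq_iff_eq]
  exact eq_comm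

lemma loopA_eq_loopB (f : Nat) : ∀ (n : Int), 1 ≤ n → loopA f n = loopB f n := by
  induction f with
  | zero => intro n _; rfl
  | succ f ih =>
    intro n hn
    rw [loopA, loopB, isArmA_eq_isNarcB n hn]
    by_cases h : isNarcB n = true
    · simp [h]
    · simp only [Bool.not_eq_true] at h
      simp [h, ih (n + 1) (by omega)]

-- ===== VERDICT (by name: the statement is the Claim_ definition above) =====
theorem next_armstrong_spec : Claim_equal_next_armstrong := by
  intro num _
  unfold Spec_next_armstrong next_armstrong next_armstrong_alt
  by_cases h : num ≤ 0
  · simp [h]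
  · rw [if_neg h, if_neg h]
    exact loopA_eq_loopB _ (num + 1) (by omega)
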